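-- pv_equiv track=rewrite | github.com/denisfeniska/School-of-backend-development | olimpiad/Maximum amount divisible by 112.py | max_sum_pair
-- ===== SOURCE A (Python) =====
-- def max_sum_pair(arr, n):
--     # Инициализация переменной с максимальной суммой и индексами пары
--     max_sum = -1
--     max_pair = []
--
--     # Поиск максимальной суммы пары, кратной 112
--     for i in range(n):
--         for j in range(i+4, n):
--             if (arr[i] > arr[j] and (arr[i] + arr[j]) % 112 == 0):
--                 if (arr[i] + arr[j]) > max_sum:
--                     max_sum = arr[i] + arr[j]
--                     max_pair = [arr[i], arr[j]]
--     # Возвращаем максимальную сумму пары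
--     return max_sum
-- ===== SOURCE B (Python) =====
-- def max_sum_pair(arr, n):
--     # Per-residue (mod 112) running max of earlier values with index gap >= 4: O(n).
--     best = {}  # residue -> max value among arr[0..j-4]
--     max_sum = -1
--     for j in range(n):
--         if j >= 4:
--             v = arr[j - 4]
--             r = v % 112
--             if r not in best or v > best[r]:
--                 best[r] = v
--         x = arr[j]
--         b = best.get((-x) % 112)
--         if b is not None and b > x and b + x > max_sum:
--             max_sum = b + x
--     return max_sum
-- ===== Notes on version B (the rewrite author's own statement) =====
-- stated objective: faster
-- what changed: Replaced the O(n^2) double loop over pairs by a single pass that keeps, per residue class mod 112, the running maximum of values at least 4 positions back, doing one dictionary lookup per element.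
-- outside the precondition, e.g. on max_sum_pair([-23, 3], 3): A returns -1, B raises IndexError
import Mathlib
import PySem

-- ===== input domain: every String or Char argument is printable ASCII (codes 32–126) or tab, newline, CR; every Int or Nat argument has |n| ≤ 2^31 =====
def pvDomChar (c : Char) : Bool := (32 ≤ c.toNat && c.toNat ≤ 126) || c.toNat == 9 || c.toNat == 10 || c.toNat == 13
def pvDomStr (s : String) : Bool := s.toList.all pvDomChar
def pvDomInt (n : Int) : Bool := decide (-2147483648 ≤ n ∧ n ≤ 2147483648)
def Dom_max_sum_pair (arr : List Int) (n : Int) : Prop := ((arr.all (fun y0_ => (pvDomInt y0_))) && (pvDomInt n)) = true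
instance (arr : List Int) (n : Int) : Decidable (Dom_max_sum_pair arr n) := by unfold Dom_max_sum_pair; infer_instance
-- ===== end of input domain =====

-- B replaces A's O(n^2) double loop by a per-residue (mod 112) running max of earlier
-- eligible values, one dictionary lookup per j — an asymptotically faster algorithm.

-- ===== PORT A =====
-- arr[i] is ported as pyGetD arr i 0; under Pre_ every accessed index is in range, so this is exact.
def max_sum_pair (arr : List Int) (n : Int) : Int :=
  (PySem.List.pyRange 0 n 1).foldl (fun max_sum i =>
    (PySem.List.pyRange (i + 4) n 1).foldl (fun max_sum j =>
      if PySem.List.pyGetD arr i 0 > PySem.List.pyGetD arr j 0 ∧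
         PySem.Int.mod (PySem.List.pyGetD arr i 0 + PySem.List.pyGetD arr j 0) 112 = 0 then
        if PySem.List.pyGetD arr i 0 + PySem.List.pyGetD arr j 0 > max_sum then
          PySem.List.pyGetD arr i 0 + PySem.List.pyGetD arr j 0
        else max_sum
      else max_sum) max_sum) (-1)

-- ===== PORT B =====
-- the "if j >= 4" dict update of B's loop body
def msp_upd (arr : List Int) (d : PySem.Dict Int Int) (j : Int) : PySem.Dict Int Int :=
  if j ≥ 4 then
    let v := PySem.List.pyGetD arr (j - 4) 0
    let r := PySem.Int.mod v 112
    match d.get? r with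
    | none => d.insert r v
    | some c => if v > c then d.insert r v else d
  else d

-- step of B's single loop: state = (best : residue -> max eligible earlier value, max_sum)
def msp_step (arr : List Int) (st : PySem.Dict Int Int × Int) (j : Int) : PySem.Dict Int Int × Int :=
  let best := msp_upd arr st.1 j
  let x := PySem.List.pyGetD arr j 0
  match best.get? (PySem.Int.mod (-x) 112) with
  | some b => if b > x ∧ b + x > st.2 then (best, b + x) else (best, st.2)
  | none => (best, st.2)

def max_sum_pair_alt (arr : List Int) (n : Int) : Int :=
  ((PySem.List.pyRange 0 n 1).foldl (msp_step arr) (PySem.Dict.empty, -1)).2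

-- ===== PRECONDITION & SPEC =====
-- Pre_ excludes n > len(arr): there A raises IndexError whenever n >= 5, and for n <= 4 it
-- returns -1 without ever indexing, while B (which reads arr[j] for every j < n) raises.
def Pre_max_sum_pair (arr : List Int) (n : Int) : Prop := n ≤ (arr.length : Int)
instance (arr : List Int) (n : Int) : Decidable (Pre_max_sum_pair arr n) := by
  unfold Pre_max_sum_pair; infer_instance

def pvWitness_max_sum_pair : List Int × Int := ([100, 1, 2, 3, 12, 5], 6)

def Spec_max_sum_pair (arr : List Int) (n : Int) (out : Int) : Prop := out = max_sum_pair_alt arr n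
instance (arr : List Int) (n : Int) (out : Int) : Decidable (Spec_max_sum_pair arr n out) := by
  unfold Spec_max_sum_pair; infer_instance

-- ===== CLAIM (what is proved, stated in full; the proofs are below) =====
def Claim_equal_max_sum_pair : Prop := ∀ (arr : List Int) (n : Int),
  Dom_max_sum_pair arr n → Pre_max_sum_pair arr n → Spec_max_sum_pair arr n (max_sum_pair arr n)

-- ===== LEMMAS AND PROOFS =====

-- abbreviation for element access as both ports perform it
def msp_g (arr : List Int) (i : Int) : Int := PySem.List.pyGetD arr i 0

-- running max of elements of l with residue r mod 112, starting from acc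
def msp_resMaxAux (r : Int) (acc : Option Int) (l : List Int) : Option Int :=
  l.foldl (fun acc w =>
    if PySem.Int.mod w 112 = r then
      match acc with
      | none => some w
      | some c => if w > c then some w else some c
    else acc) acc

def msp_resMax (r : Int) (l : List Int) : Option Int := msp_resMaxAux r none l

-- the (0- or 1-element) candidate list B contributes at step j
def msp_cand (arr : List Int) (j : Int) : List Int :=
  match msp_resMax (PySem.Int.mod (-(msp_g arr j)) 112) (arr.take (j - 3).toNat) with
  | some b => if b > msp_g arr j then [b + msp_g arr j] else []
  | none => []

-- A's candidate list: all sums over valid pairs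
def msp_pairsA (arr : List Int) (n : Int) : List Int :=
  (PySem.List.pyRange 0 n 1).flatMap (fun i =>
    ((PySem.List.pyRange (i + 4) n 1).filter (fun j =>
        decide (msp_g arr i > msp_g arr j ∧
                PySem.Int.mod (msp_g arr i + msp_g arr j) 112 = 0))).map
      (fun j => msp_g arr i + msp_g arr j))

lemma msp_foldl_flatMap {α : Type} (f : Int → Int → Int) (g : α → List Int)
    (l : List α) (init : Int) :
    l.foldl (fun a x => (g x).foldl f a) init = (l.flatMap g).foldl f init := by
  induction l generalizing init with
  | nil => rfl
  | cons h t ih => simp [List.flatMap_cons, List.foldl_append, ih]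

-- A equals the fold of max over its candidate list
lemma msp_A_eq (arr : List Int) (n : Int) :
    max_sum_pair arr n = (msp_pairsA arr n).foldl max (-1) := by
  unfold max_sum_pair msp_pairsA
  rw [← msp_foldl_flatMap]
  apply PySem.List.foldl_congr_mem
  intro ms i _
  rw [List.foldl_map, ← PySem.List.foldl_if_eq_foldl_filter]
  apply PySem.List.foldl_congr_mem
  intro acc j _
  simp only [msp_g]
  split_ifs <;> simp_all <;> omega

-- resMaxAux facts
lemma msp_resMaxAux_cons_none (r w : Int) (t : List Int) :
    msp_resMaxAux r none (w :: t) =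
      if PySem.Int.mod w 112 = r then msp_resMaxAux r (some w) t
      else msp_resMaxAux r none t := by
  show List.foldl _ (if PySem.Int.mod w 112 = r then some w else none) t = _
  split_ifs with h <;> rfl

lemma msp_resMaxAux_cons_some (r c w : Int) (t : List Int) :
    msp_resMaxAux r (some c) (w :: t) =
      if PySem.Int.mod w 112 = r ∧ w > c then msp_resMaxAux r (some w) t
      else msp_resMaxAux r (some c) t := by
  show List.foldl _
      (if PySem.Int.mod w 112 = r then (if w > c then some w else some c) else some c) t = _
  split_ifs with h hc <;> first | rfl | (exfalso; tauto)

lemma msp_resMaxAux_mem (r : Int) (l : List Int) (acc : Option Int) :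
    msp_resMaxAux r acc l = acc ∨
      ∃ b, msp_resMaxAux r acc l = some b ∧ b ∈ l ∧ PySem.Int.mod b 112 = r := by
  induction l generalizing acc with
  | nil => left; rfl
  | cons w t ih =>
    cases acc with
    | none =>
      rw [msp_resMaxAux_cons_none]
      split_ifs with hw
      · rcases ih (some w) with h | ⟨b, hb, hm, hbr⟩
        · right; exact ⟨w, h, by simp, hw⟩
        · right; exact ⟨b, hb, by simp [hm], hbr⟩
      · rcases ih none with h | ⟨b, hb, hm, hbr⟩
        · left; exact h
        · right; exact ⟨b, hb, by simp [hm], hbr⟩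
    | some c =>
      rw [msp_resMaxAux_cons_some]
      split_ifs with hw
      · rcases ih (some w) with h | ⟨b, hb, hm, hbr⟩
        · right; exact ⟨w, h, by simp, hw.1⟩
        · right; exact ⟨b, hb, by simp [hm], hbr⟩
      · rcases ih (some c) with h | ⟨b, hb, hm, hbr⟩
        · left; exact h
        · right; exact ⟨b, hb, by simp [hm], hbr⟩

lemma msp_resMaxAux_acc_le (r : Int) (l : List Int) (c : Int) :
    ∃ b, msp_resMaxAux r (some c) l = some b ∧ c ≤ b := by
  induction l generalizing c with
  | nil => exact ⟨c, rfl, le_refl c⟩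
  | cons w t ih =>
    rw [msp_resMaxAux_cons_some]
    split_ifs with h
    · obtain ⟨b, hb, hle⟩ := ih w
      exact ⟨b, hb, le_trans (le_of_lt h.2) hle⟩
    · exact ih c

lemma msp_resMaxAux_le (r : Int) (l : List Int) (acc : Option Int) (v : Int)
    (hv : v ∈ l) (hr : PySem.Int.mod v 112 = r) :
    ∃ b, msp_resMaxAux r acc l = some b ∧ v ≤ b := by
  induction l generalizing acc with
  | nil => simp at hv
  | cons w t ih =>
    rcases List.mem_cons.mp hv with hvw | hvt
    · subst hvw
      cases acc with
      | none =>
        rw [msp_resMaxAux_cons_none, if_pos hr]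
        exact msp_resMaxAux_acc_le r t v
      | some c =>
        rw [msp_resMaxAux_cons_some]
        by_cases hc : v > c
        · rw [if_pos ⟨hr, hc⟩]
          exact msp_resMaxAux_acc_le r t v
        · rw [if_neg (by tauto)]
          obtain ⟨b, hb, hle⟩ := msp_resMaxAux_acc_le r t c
          exact ⟨b, hb, by omega⟩
    · cases acc with
      | none =>
        rw [msp_resMaxAux_cons_none]
        split_ifs with h
        · exact ih (some w) hvt
        · exact ih none hvt
      | some c =>
        rw [msp_resMaxAux_cons_some]
        split_ifs with h
        · exact ih (some w) hvt
        · exact ih (some c) hvt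

-- invariant: dict agrees with resMax of the eligible prefix
def msp_inv (arr : List Int) (j : Int) (d : PySem.Dict Int Int) : Prop :=
  ∀ r, d.get? r = msp_resMax r (arr.take (j - 4).toNat)

lemma msp_resMax_append (r v : Int) (l : List Int) :
    msp_resMax r (l ++ [v]) =
      if PySem.Int.mod v 112 = r then
        match msp_resMax r l with
        | none => some v
        | some c => if v > c then some v else some c
      else msp_resMax r l := by
  unfold msp_resMax msp_resMaxAux
  rw [List.foldl_append]
  rfl

lemma msp_upd_spec (arr : List Int) (t : Int) (d : PySem.Dict Int Int)
    (ht0 : 0 ≤ t) (hlt : t < (arr.length : Int)) (hd : msp_inv arr t d) :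
    ∀ r, (msp_upd arr d t).get? r = msp_resMax r (arr.take (t - 3).toNat) := by
  intro r
  unfold msp_upd
  by_cases h4 : t ≥ 4
  · rw [if_pos h4]
    have hk : (t - 3).toNat = (t - 4).toNat + 1 := by omega
    have hlen : (t - 4).toNat < arr.length := by omega
    have hv : PySem.List.pyGetD arr (t - 4) 0 = arr[(t - 4).toNat] :=
      PySem.List.pyGetD_eq_getElem arr 0 (by omega) (by omega)
    have htake : arr.take (t - 3).toNat = arr.take (t - 4).toNat ++ [arr[(t - 4).toNat]] := by
      rw [hk, List.take_add_one, List.getElem?_eq_getElem hlen]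
      rfl
    rw [htake, msp_resMax_append]
    dsimp only
    rw [hv]
    have hdv := hd (PySem.Int.mod (arr[(t - 4).toNat]) 112)
    cases hq : d.get? (PySem.Int.mod (arr[(t - 4).toNat]) 112) with
    | none =>
      rw [hq] at hdv
      dsimp only
      simp only [PySem.Dict.get?_insert]
      by_cases hrr : PySem.Int.mod (arr[(t - 4).toNat]) 112 = r
      · subst hrr
        rw [if_pos rfl, if_pos rfl, ← hdv]
      · rw [if_neg (fun h => hrr h.symm), if_neg hrr]
        exact hd r
    | some c =>
      rw [hq] at hdv
      dsimp only
      by_cases hvc : arr[(t - 4).toNat] > c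
      · rw [if_pos hvc]
        simp only [PySem.Dict.get?_insert]
        by_cases hrr : PySem.Int.mod (arr[(t - 4).toNat]) 112 = r
        · subst hrr
          rw [if_pos rfl, if_pos rfl, ← hdv]
          dsimp only
          rw [if_pos hvc]
        · rw [if_neg (fun h => hrr h.symm), if_neg hrr]
          exact hd r
      · rw [if_neg hvc]
        by_cases hrr : PySem.Int.mod (arr[(t - 4).toNat]) 112 = r
        · subst hrr
          rw [if_pos rfl, ← hdv]
          dsimp only
          rw [if_neg hvc]
          exact hq
        · rw [if_neg hrr]
          exact hd r
  · rw [if_neg h4]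
    rw [show (t - 3).toNat = (t - 4).toNat from by omega]
    exact hd r

lemma msp_step_spec (arr : List Int) (t : Int) (d : PySem.Dict Int Int) (m : Int)
    (ht0 : 0 ≤ t) (hlt : t < (arr.length : Int)) (hd : msp_inv arr t d) :
    msp_inv arr (t + 1) (msp_step arr (d, m) t).1 ∧
      (msp_step arr (d, m) t).2 = (msp_cand arr t).foldl max m := by
  have hupd := msp_upd_spec arr t d ht0 hlt hd
  have hfst : (msp_step arr (d, m) t).1 = msp_upd arr d t := by
    unfold msp_step
    dsimp only
    cases hq : (msp_upd arr d t).get? (PySem.Int.mod (-(PySem.List.pyGetD arr t 0)) 112) with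
    | none => rfl
    | some b =>
      dsimp only
      split_ifs <;> rfl
  constructor
  · intro r
    rw [hfst, show t + 1 - 4 = t - 3 from by ring]
    exact hupd r
  · unfold msp_step msp_cand
    dsimp only
    simp only [msp_g]
    rw [hupd (PySem.Int.mod (-(PySem.List.pyGetD arr t 0)) 112)]
    cases hq : msp_resMax (PySem.Int.mod (-(PySem.List.pyGetD arr t 0)) 112)
        (arr.take (t - 3).toNat) with
    | none => rfl
    | some b =>
      dsimp only
      by_cases hbx : b > PySem.List.pyGetD arr t 0
      · rw [if_pos hbx]
        simp only [List.foldl_cons, List.foldl_nil]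
        by_cases hbm : b + PySem.List.pyGetD arr t 0 > m
        · rw [if_pos ⟨hbx, hbm⟩, max_eq_right (by omega)]
        · rw [if_neg (by tauto), max_eq_left (by omega)]
      · rw [if_neg hbx, if_neg (by tauto)]
        rfl

-- B equals the fold of max over its candidates, by the loop invariant
lemma msp_B_loop (arr : List Int) (n : Int) (hn : n ≤ (arr.length : Int)) :
    ∀ (k : Nat) (t : Int) (d : PySem.Dict Int Int) (m : Int),
      0 ≤ t → k = (n - t).toNat → msp_inv arr t d →
      ((PySem.List.pyRange t n 1).foldl (msp_step arr) (d, m)).2 =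
        ((PySem.List.pyRange t n 1).flatMap (msp_cand arr)).foldl max m := by
  intro k
  induction k with
  | zero =>
    intro t d m ht hk hd
    rw [PySem.List.pyRange_one_eq_nil (by omega)]
    rfl
  | succ k ih =>
    intro t d m ht hk hd
    have htn : t < n := by omega
    rw [PySem.List.pyRange_one_cons htn, List.foldl_cons, List.flatMap_cons,
        List.foldl_append]
    obtain ⟨hinv, hsnd⟩ := msp_step_spec arr t d m ht (by omega) hd
    have hrec := ih (t + 1) (msp_step arr (d, m) t).1 (msp_step arr (d, m) t).2
      (by omega) (by omega) hinv
    rw [hsnd] at hrec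
    have heta : msp_step arr (d, m) t =
        ((msp_step arr (d, m) t).1, List.foldl max m (msp_cand arr t)) := by
      rw [← hsnd]
    rw [heta]
    exact hrec

lemma msp_B_eq (arr : List Int) (n : Int) (hn : n ≤ (arr.length : Int)) :
    max_sum_pair_alt arr n =
      ((PySem.List.pyRange 0 n 1).flatMap (msp_cand arr)).foldl max (-1) := by
  unfold max_sum_pair_alt
  exact msp_B_loop arr n hn (n - 0).toNat 0 PySem.Dict.empty (-1) (le_refl 0) rfl
    (fun r => by simp [PySem.Dict.get?_empty, msp_resMax, msp_resMaxAux])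

-- membership characterisations and mutual domination
lemma msp_mem_pairsA (arr : List Int) (n : Int) (x : Int) :
    x ∈ msp_pairsA arr n ↔
      ∃ i j, 0 ≤ i ∧ i + 4 ≤ j ∧ j < n ∧
        msp_g arr i > msp_g arr j ∧
        PySem.Int.mod (msp_g arr i + msp_g arr j) 112 = 0 ∧
        x = msp_g arr i + msp_g arr j := by
  unfold msp_pairsA
  simp only [List.mem_flatMap, List.mem_map, List.mem_filter,
    PySem.List.mem_pyRange_one, decide_eq_true_eq]
  constructor
  · rintro ⟨i, ⟨hi0, hin⟩, j, ⟨⟨hj1, hj2⟩, h1, h2⟩, hx⟩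
    exact ⟨i, j, hi0, hj1, hj2, h1, h2, hx.symm⟩
  · rintro ⟨i, j, hi0, hj1, hj2, h1, h2, hx⟩
    exact ⟨i, ⟨hi0, by omega⟩, j, ⟨⟨hj1, hj2⟩, h1, h2⟩, hx.symm⟩

lemma msp_LB_sub (arr : List Int) (n : Int) (hn : n ≤ (arr.length : Int)) (y : Int)
    (hy : y ∈ (PySem.List.pyRange 0 n 1).flatMap (msp_cand arr)) :
    y ∈ msp_pairsA arr n := by
  rw [List.mem_flatMap] at hy
  obtain ⟨j, hjr, hyc⟩ := hy
  rw [PySem.List.mem_pyRange_one] at hjr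
  obtain ⟨hj0, hjn⟩ := hjr
  unfold msp_cand at hyc
  cases hq : msp_resMax (PySem.Int.mod (-(msp_g arr j)) 112) (arr.take (j - 3).toNat) with
  | none => rw [hq] at hyc; simp at hyc
  | some b =>
    rw [hq] at hyc
    dsimp only at hyc
    by_cases hbx : b > msp_g arr j
    · rw [if_pos hbx] at hyc
      rcases List.mem_singleton.mp hyc with rfl
      -- locate b as an earlier element of arr
      rcases msp_resMaxAux_mem (PySem.Int.mod (-(msp_g arr j)) 112) (arr.take (j - 3).toNat)
          none with hnone | ⟨b', hb', hbmem, hbr⟩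
      · rw [msp_resMax] at hq; rw [hnone] at hq; exact absurd hq (by simp)
      · rw [msp_resMax] at hq; rw [hb'] at hq
        injection hq with hq'
        subst hq'
        obtain ⟨i', hi'len, hi'eq⟩ := List.mem_iff_getElem.mp hbmem
        have hlen : (arr.take (j - 3).toNat).length = min (j - 3).toNat arr.length :=
          List.length_take
        have hi'k : i' < (j - 3).toNat := by omega
        have hi'a : i' < arr.length := by omega
        have hgi : (arr.take (j - 3).toNat)[i']'hi'len = arr[i']'hi'a :=
          List.getElem_take
        have hg : msp_g arr (i' : Int) = b' := by
          unfold msp_g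
          rw [PySem.List.pyGetD_eq_getElem arr 0 (by omega) (by omega)]
          simp only [Int.toNat_natCast]
          rw [← hgi]
          exact hi'eq
        rw [msp_mem_pairsA]
        refine ⟨(i' : Int), j, by omega, by omega, hjn, ?_, ?_, ?_⟩
        · rw [hg]; exact hbx
        · rw [hg]
          simp only [PySem.Int.mod_eq_emod_of_pos (show (0:Int) < 112 by norm_num)] at hbr ⊢
          omega
        · rw [hg]
    · rw [if_neg hbx] at hyc; simp at hyc

lemma msp_LA_dom (arr : List Int) (n : Int) (hn : n ≤ (arr.length : Int)) (x : Int)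
    (hx : x ∈ msp_pairsA arr n) :
    ∃ y ∈ (PySem.List.pyRange 0 n 1).flatMap (msp_cand arr), x ≤ y := by
  rw [msp_mem_pairsA] at hx
  obtain ⟨i, j, hi0, hij, hjn, hgt, hmod, hxeq⟩ := hx
  have hilen : i < (arr.length : Int) := by omega
  have hitn : i.toNat < arr.length := by omega
  have hgi : msp_g arr i = arr[i.toNat] := by
    unfold msp_g
    exact PySem.List.pyGetD_eq_getElem arr 0 hi0 hilen
  -- arr[i] is among the eligible values at step j
  have hmemtake : arr[i.toNat] ∈ arr.take (j - 3).toNat := by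
    rw [List.mem_iff_getElem]
    refine ⟨i.toNat, by simp [List.length_take]; omega, ?_⟩
    exact List.getElem_take
  have hres : PySem.Int.mod (arr[i.toNat]) 112 = PySem.Int.mod (-(msp_g arr j)) 112 := by
    have h112 : (0:Int) < 112 := by norm_num
    rw [← hgi]
    simp only [PySem.Int.mod_eq_emod_of_pos h112] at hmod ⊢
    omega
  obtain ⟨b, hb, hvb⟩ := msp_resMaxAux_le (PySem.Int.mod (-(msp_g arr j)) 112)
    (arr.take (j - 3).toNat) none (arr[i.toNat]) hmemtake hres
  have hbx : b > msp_g arr j := by rw [hgi] at hgt; omega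
  refine ⟨b + msp_g arr j, ?_, ?_⟩
  · rw [List.mem_flatMap]
    refine ⟨j, ?_, ?_⟩
    · rw [PySem.List.mem_pyRange_one]; omega
    · unfold msp_cand
      rw [show msp_resMax (PySem.Int.mod (-(msp_g arr j)) 112) (arr.take (j - 3).toNat) = some b
        from hb]
      dsimp only
      rw [if_pos hbx]
      simp
  · rw [hxeq, hgi]; omega

lemma msp_fold_eq (L L' : List Int) (m : Int)
    (h1 : ∀ y ∈ L', y ∈ L) (h2 : ∀ x ∈ L, ∃ y ∈ L', x ≤ y) :
    L.foldl max m = L'.foldl max m := by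
  apply le_antisymm
  · rcases PySem.List.foldl_max_mem L m with h | h
    · rw [h]; exact (PySem.List.le_foldl_max L' m).1
    · obtain ⟨y, hy, hle⟩ := h2 _ h
      exact le_trans hle ((PySem.List.le_foldl_max L' m).2 y hy)
  · rcases PySem.List.foldl_max_mem L' m with h | h
    · rw [h]; exact (PySem.List.le_foldl_max L m).1
    · exact (PySem.List.le_foldl_max L m).2 _ (h1 _ h)

-- ===== VERDICT (by name: the statement is the Claim_ definition above) =====
theorem max_sum_pair_spec : Claim_equal_max_sum_pair := by
  intro arr n _ hpre
  unfold Spec_max_sum_pair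
  rw [msp_A_eq, msp_B_eq arr n hpre]
  exact msp_fold_eq _ _ _ (msp_LB_sub arr n hpre) (msp_LA_dom arr n hpre)
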